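-- pv_equiv track=rewrite | github.com/AaronYu94/TA-MPQ | src/ta_mpq/local_search.py | _next_lower_bit
-- ===== SOURCE A (Python) =====
-- def _next_lower_bit(bit_width: int, allowed_bits: tuple[int, ...]) -> int | None:
--     allowed = sorted(set(int(bit) for bit in allowed_bits))
--     try:
--         index = allowed.index(int(bit_width))
--     except ValueError:
--         return None
--     if index == 0:
--         return None
--     return allowed[index - 1]
-- ===== SOURCE B (Python) =====
-- def _next_lower_bit(bit_width: int, allowed_bits: tuple[int, ...]) -> int | None:
--     # Single linear pass: track whether bit_width occurs and the largest allowed value below it.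
--     bw = int(bit_width)
--     found = False
--     best = None
--     for bit in allowed_bits:
--         b = int(bit)
--         if b == bw:
--             found = True
--         elif b < bw:
--             if best is None or b > best:
--                 best = b
--     return best if found else None
-- ===== Notes on version B (the rewrite author's own statement) =====
-- stated objective: faster
-- what changed: Replaces A's sort-the-deduplicated-set-plus-index-lookup with one linear pass that tracks whether bit_width occurs and the largest allowed value strictly below it.
import Mathlib
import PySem

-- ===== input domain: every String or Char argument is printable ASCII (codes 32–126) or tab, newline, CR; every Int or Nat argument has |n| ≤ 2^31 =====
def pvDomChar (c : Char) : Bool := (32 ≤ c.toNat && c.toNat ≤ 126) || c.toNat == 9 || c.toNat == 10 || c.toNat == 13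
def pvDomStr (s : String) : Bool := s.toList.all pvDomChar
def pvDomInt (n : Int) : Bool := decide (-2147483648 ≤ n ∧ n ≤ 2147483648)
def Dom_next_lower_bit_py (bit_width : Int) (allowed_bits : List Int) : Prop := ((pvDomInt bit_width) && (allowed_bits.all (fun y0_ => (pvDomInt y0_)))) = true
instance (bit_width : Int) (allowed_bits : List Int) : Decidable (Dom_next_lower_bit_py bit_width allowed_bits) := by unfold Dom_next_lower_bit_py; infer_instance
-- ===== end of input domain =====

-- B replaces A's sort-the-deduplicated-set-then-index lookup by a single linear pass
-- that tracks membership of bit_width and the largest allowed value strictly below it (objective: faster, O(n) vs O(n log n), measured).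

-- ===== PORT A =====
-- int(bit) / int(bit_width) are identities on Int arguments and are omitted.
def next_lower_bit_py (bit_width : Int) (allowed_bits : List Int) : Option Int :=
  let allowed := PySem.List.sorted (PySem.Set.ofList allowed_bits) (fun x => x) false
  match PySem.List.index? allowed bit_width with
  | none => none                      -- except ValueError: return None
  | some index =>
    if index = 0 then none
    else PySem.List.pyGet? allowed ((index : Int) - 1)    -- allowed[index - 1]; index ≥ 1 so in range (exact)

-- ===== PORT B =====
def nlbStep (bw : Int) (st : Bool × Option Int) (b : Int) : Bool × Option Int :=
  if b = bw then (true, st.2)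
  else if b < bw then
    match st.2 with
    | none => (st.1, some b)
    | some y => if y < b then (st.1, some b) else st
  else st

def next_lower_bit_py_alt (bit_width : Int) (allowed_bits : List Int) : Option Int :=
  let r := allowed_bits.foldl (nlbStep bit_width) (false, none)
  if r.1 then r.2 else none

-- ===== PRECONDITION & SPEC =====
def Spec_next_lower_bit_py (bit_width : Int) (allowed_bits : List Int) (out : Option Int) : Prop := out = next_lower_bit_py_alt bit_width allowed_bits
instance (bit_width : Int) (allowed_bits : List Int) (out : Option Int) : Decidable (Spec_next_lower_bit_py bit_width allowed_bits out) := by unfold Spec_next_lower_bit_py; infer_instance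

-- ===== CLAIM (what is proved, stated in full; the proofs are below) =====
def Claim_equal_next_lower_bit_py : Prop := ∀ (bit_width : Int) (allowed_bits : List Int), Dom_next_lower_bit_py bit_width allowed_bits → Spec_next_lower_bit_py bit_width allowed_bits (next_lower_bit_py bit_width allowed_bits)

-- ===== LEMMAS AND PROOFS =====

-- the second component of B's fold, as a plain recursion (independent of the found flag)
def nlbBest (bw : Int) (b : Option Int) : List Int → Option Int
  | [] => b
  | x :: l => nlbBest bw
      (if x = bw then b
       else if x < bw then
         match b with
         | none => some x
         | some y => if y < x then some x else b
       else b) l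

theorem nlb_fold_eq (bw : Int) : ∀ (xs : List Int) (f : Bool) (b : Option Int),
    xs.foldl (nlbStep bw) (f, b) = (f || decide (bw ∈ xs), nlbBest bw b xs) := by
  intro xs
  induction xs with
  | nil => intro f b; simp [nlbBest]
  | cons x l ih =>
    intro f b
    simp only [List.foldl_cons, nlbStep, nlbBest, List.mem_cons]
    by_cases hx : x = bw
    · simp [hx, ih]
    · by_cases hlt : x < bw
      · cases b with
        | none => simp [hx, hlt, ih, Ne.symm hx]
        | some y =>
          by_cases hy : y < x
          · simp [hx, hlt, hy, ih, Ne.symm hx]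
          · simp [hx, hlt, hy, ih, Ne.symm hx]
      · simp [hx, hlt, ih, Ne.symm hx]

theorem nlbBest_none_iff (bw : Int) : ∀ (xs : List Int) (b : Option Int),
    nlbBest bw b xs = none ↔ (b = none ∧ ∀ x ∈ xs, ¬ x < bw) := by
  intro xs
  induction xs with
  | nil => intro b; simp [nlbBest]
  | cons x l ih =>
    intro b
    simp only [nlbBest, List.mem_cons]
    by_cases hx : x = bw
    · subst hx
      rw [if_pos rfl, ih]
      constructor
      · rintro ⟨h1, h2⟩; exact ⟨h1, fun y hy => hy.elim (fun e => by simp [e]) (h2 y)⟩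
      · rintro ⟨h1, h2⟩; exact ⟨h1, fun y hy => h2 y (Or.inr hy)⟩
    · by_cases hlt : x < bw
      · cases b with
        | none =>
          simp only [hx, hlt, if_pos, ite_false]
          rw [ih]
          constructor
          · rintro ⟨h, -⟩; exact absurd h (by simp)
          · rintro ⟨-, h2⟩; exact absurd hlt (h2 x (Or.inl rfl))
        | some y =>
          by_cases hy : y < x <;>
          · simp only [hx, hlt, hy, if_pos, ite_false]
            rw [ih]
            constructor
            · rintro ⟨h, -⟩; exact absurd h (by simp)
            · rintro ⟨h, -⟩; exact absurd h (by simp)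
      · simp only [hx, hlt, ite_false]
        rw [ih]
        constructor
        · rintro ⟨h1, h2⟩
          exact ⟨h1, fun y hy => hy.elim (fun e => by simp [e, hlt]) (h2 y)⟩
        · rintro ⟨h1, h2⟩; exact ⟨h1, fun y hy => h2 y (Or.inr hy)⟩

theorem nlbBest_some (bw : Int) : ∀ (xs : List Int) (b : Option Int) (m : Int),
    nlbBest bw b xs = some m →
      ((m ∈ xs ∧ m < bw) ∨ b = some m) ∧
      (∀ y ∈ xs, y < bw → y ≤ m) ∧ (∀ y, b = some y → y ≤ m) := by
  intro xs
  induction xs with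
  | nil => intro b m h; simp [nlbBest] at h; exact ⟨Or.inr h, by simp, fun y hy => by simp [h] at hy; omega⟩
  | cons x l ih =>
    intro b m h
    simp only [nlbBest] at h
    by_cases hx : x = bw
    · subst hx
      rw [if_pos rfl] at h
      obtain ⟨h1, h2, h3⟩ := ih b m h
      refine ⟨?_, ?_, h3⟩
      · exact h1.imp (fun ⟨a, c⟩ => ⟨List.mem_cons_of_mem _ a, c⟩) id
      · intro y hy hylt
        rcases List.mem_cons.1 hy with e | e
        · omega
        · exact h2 y e hylt
    · by_cases hlt : x < bw
      · rw [if_neg hx, if_pos hlt] at h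
        cases b with
        | none =>
          obtain ⟨h1, h2, h3⟩ := ih (some x) m h
          have hxm : x ≤ m := h3 x rfl
          refine ⟨Or.inl ?_, ?_, by simp⟩
          · rcases h1 with ⟨a, c⟩ | e
            · exact ⟨List.mem_cons_of_mem _ a, c⟩
            · simp at e; subst e; exact ⟨List.mem_cons_self, hlt⟩
          · intro y hy hylt
            rcases List.mem_cons.1 hy with e | e
            · omega
            · exact h2 y e hylt
        | some y0 =>
          by_cases hy : y0 < x
          · have h : nlbBest bw (some x) l = some m := by
              simpa [hy] using h
            obtain ⟨h1, h2, h3⟩ := ih (some x) m h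
            have hxm : x ≤ m := h3 x rfl
            refine ⟨Or.inl ?_, ?_, ?_⟩
            · rcases h1 with ⟨a, c⟩ | e
              · exact ⟨List.mem_cons_of_mem _ a, c⟩
              · simp at e; subst e; exact ⟨List.mem_cons_self, hlt⟩
            · intro y hy' hylt
              rcases List.mem_cons.1 hy' with e | e
              · omega
              · exact h2 y e hylt
            · intro y hy'; simp at hy'; omega
          · have h : nlbBest bw (some y0) l = some m := by
              simpa [hy] using h
            obtain ⟨h1, h2, h3⟩ := ih (some y0) m h
            have hym : y0 ≤ m := h3 y0 rfl
            refine ⟨?_, ?_, ?_⟩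
            · exact h1.imp (fun ⟨a, c⟩ => ⟨List.mem_cons_of_mem _ a, c⟩) id
            · intro y hy' hylt
              rcases List.mem_cons.1 hy' with e | e
              · omega
              · exact h2 y e hylt
            · intro y hy'; simp at hy'; omega
      · rw [if_neg hx, if_neg hlt] at h
        obtain ⟨h1, h2, h3⟩ := ih b m h
        refine ⟨h1.imp (fun ⟨a, c⟩ => ⟨List.mem_cons_of_mem _ a, c⟩) id, ?_, h3⟩
        intro y hy hylt
        rcases List.mem_cons.1 hy with e | e
        · omega
        · exact h2 y e hylt

-- membership in sorted(set(xs)) is membership in xs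
theorem mem_allowed (xs : List Int) (v : Int) :
    v ∈ PySem.List.sorted (PySem.Set.ofList xs) (fun x => x) false ↔ v ∈ xs := by
  rw [PySem.List.mem_sorted, PySem.Set.mem_ofList]

theorem next_lower_bit_py_spec : Claim_equal_next_lower_bit_py := by
  intro bw xs _
  unfold Spec_next_lower_bit_py next_lower_bit_py next_lower_bit_py_alt
  rw [nlb_fold_eq]
  set allowed := PySem.List.sorted (PySem.Set.ofList xs) (fun x => x) false with hallowed
  have hpw : allowed.Pairwise (· < ·) := PySem.List.sorted_ofList_pairwise_lt xs
  by_cases hmem : bw ∈ xs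
  · have hmem' : bw ∈ allowed := (mem_allowed xs bw).2 hmem
    obtain ⟨i, hidx⟩ := Option.isSome_iff_exists.1 ((PySem.List.index?_isSome_iff allowed bw).2 hmem')
    obtain ⟨hk, hget, _⟩ := PySem.List.getElem_of_index?_eq_some hidx
    rw [PySem.List.index?_eq_idxOf?] at hidx
    have hmono : ∀ p q : Nat, (hpq : p < q) → (hq : q < allowed.length) → allowed[p]'(by omega) < allowed[q] := by
      intro p q hpq hq
      exact List.pairwise_iff_getElem.1 hpw p q (by omega) hq hpq
    by_cases hi : i = 0
    · subst hi
      -- every element of xs is ≥ bw, so B's best is none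
      have hnone : nlbBest bw none xs = none := by
        rw [nlbBest_none_iff]
        refine ⟨rfl, fun x hx hxlt => ?_⟩
        have hx' : x ∈ allowed := (mem_allowed xs x).2 hx
        obtain ⟨j, hj, hje⟩ := List.getElem_of_mem hx'
        rcases Nat.eq_zero_or_pos j with hj0 | hj0
        · subst hj0; rw [hget] at hje; omega
        · have := hmono 0 j hj0 hj; rw [hget, hje] at this; omega
      simp [hidx, hnone, hmem]
    · have hi1 : i - 1 < allowed.length := by omega
      have hcast : ((i : Int) - 1) = ((i - 1 : Nat) : Int) := by omega
      -- allowed[i-1] is the greatest element of xs below bw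
      have haxs : allowed[i - 1] ∈ xs := (mem_allowed xs _).1 (List.getElem_mem hi1)
      have halt : allowed[i - 1] < bw := by have := hmono (i - 1) i (by omega) hk; rw [hget] at this; omega
      have hmax : ∀ y ∈ xs, y < bw → y ≤ allowed[i - 1] := by
        intro y hy hylt
        have hy' : y ∈ allowed := (mem_allowed xs y).2 hy
        obtain ⟨j, hj, hje⟩ := List.getElem_of_mem hy'
        by_cases hji : j < i
        · rcases Nat.lt_or_ge j (i - 1) with hj1 | hj1
          · have := hmono j (i - 1) hj1 hi1; omega
          · have : j = i - 1 := by omega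
            subst this; omega
        · rcases Nat.lt_or_ge i j with hij | hij
          · have := hmono i j hij hj; rw [hget, hje] at this; omega
          · have : j = i := by omega
            subst this; rw [hget] at hje; omega
      -- B's best is some m with the same extremal property, so m = a
      have hne : nlbBest bw none xs ≠ none := by
        intro hc; rw [nlbBest_none_iff] at hc; exact absurd halt (hc.2 _ haxs)
      obtain ⟨m, hm⟩ := Option.ne_none_iff_exists'.1 hne
      obtain ⟨h1, h2, -⟩ := nlbBest_some bw xs none m hm
      rcases h1 with ⟨hmxs, hmlt⟩ | e
      · have hma : m = allowed[i - 1] := le_antisymm (hmax m hmxs hmlt) (h2 _ haxs halt)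
        simp [hidx, hi, hcast, hm, hmem, hma, List.getElem?_eq_getElem hi1]
      · exact absurd e (by simp)
  · have hidx : PySem.List.index? allowed bw = none :=
      (PySem.List.index?_eq_none_iff allowed bw).2 (fun h => hmem ((mem_allowed xs bw).1 h))
    rw [PySem.List.index?_eq_idxOf?] at hidx
    simp [hidx, hmem]
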